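-- pv_equiv track=rewrite | github.com/deysantanu84/python-portfolio | problemSolving/printPattern2.py | printPattern2
-- ===== SOURCE A (Python) =====
-- def printPattern2(A):
--     result = []
--     for i in range(A):
--         row = []
--         for j in range(A):
--             row.append(0)
--         result.append(row)
--
--     for i in range(A):
--         columnIndex = A - 1
--         for j in range(1, i+2):
--             result[i][columnIndex] = j
--             columnIndex -= 1
--     return result
-- ===== SOURCE B (Python) =====
-- def printPattern2(A):
--     # closed form: cell (i, j) is A - j when i + j >= A - 1, else 0
--     return [[A - j if i + j >= A - 1 else 0 for j in range(A)] for i in range(A)]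
-- ===== Notes on version B (the rewrite author's own statement) =====
-- stated objective: simpler
-- what changed: Replaces A's two phases (zero-fill of the whole matrix, then an incremental right-to-left diagonal overwrite with a decrementing column counter) by a single pass computing each cell directly from the closed form A-j if i+j >= A-1 else 0.
import Mathlib
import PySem

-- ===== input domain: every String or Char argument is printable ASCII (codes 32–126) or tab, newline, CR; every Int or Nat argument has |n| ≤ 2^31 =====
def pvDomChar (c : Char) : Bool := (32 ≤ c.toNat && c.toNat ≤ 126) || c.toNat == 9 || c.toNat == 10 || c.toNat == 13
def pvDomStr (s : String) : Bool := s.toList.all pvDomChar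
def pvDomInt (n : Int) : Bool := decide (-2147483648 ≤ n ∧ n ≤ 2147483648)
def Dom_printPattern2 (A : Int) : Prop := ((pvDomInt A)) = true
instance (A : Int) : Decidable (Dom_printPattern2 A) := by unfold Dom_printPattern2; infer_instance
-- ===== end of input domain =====

-- B replaces A's two phases (zero-fill then incremental diagonal overwrite) by a
-- single pass computing each cell from the closed form A-j if i+j >= A-1 else 0 (simpler).

-- ===== PORT A =====
def printPattern2 (A : Int) : List (List Int) :=
  -- phase 1: build A rows of A zeros by appending
  let result : List (List Int) :=
    (PySem.List.pyRange 0 A 1).foldl (fun result _i =>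
      let row : List Int := (PySem.List.pyRange 0 A 1).foldl (fun row _j => row ++ [(0 : Int)]) []
      result ++ [row]) []
  -- phase 2: for each i, set result[i][columnIndex] = j for j = 1..i+1, columnIndex counting down from A-1
  (PySem.List.pyRange 0 A 1).foldl (fun result i =>
    ((PySem.List.pyRange 1 (i + 2) 1).foldl
      (fun (st : List (List Int) × Int) j =>
        (PySem.List.pySetD st.1 i (PySem.List.pySetD (PySem.List.pyGetD st.1 i []) st.2 j), st.2 - 1))
      (result, A - 1)).1) result

-- ===== PORT B =====
def printPattern2_alt (A : Int) : List (List Int) :=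
  (PySem.List.pyRange 0 A 1).map (fun i =>
    (PySem.List.pyRange 0 A 1).map (fun j => if A - 1 ≤ i + j then A - j else 0))

-- ===== PRECONDITION & SPEC =====
def Spec_printPattern2 (A : Int) (out : List (List Int)) : Prop := out = printPattern2_alt A
instance (A : Int) (out : List (List Int)) : Decidable (Spec_printPattern2 A out) := by unfold Spec_printPattern2; infer_instance

-- ===== CLAIM (what is proved, stated in full; the proofs are below) =====
def Claim_equal_printPattern2 : Prop := ∀ (A : Int), Dom_printPattern2 A → Spec_printPattern2 A (printPattern2 A)

-- ===== LEMMAS AND PROOFS =====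

-- the all-zero row and the final row of B's closed form
def pvZrow (A : Int) : List Int := (PySem.List.pyRange 0 A 1).map (fun _ => (0 : Int))
def pvFrow (A i : Int) : List Int :=
  (PySem.List.pyRange 0 A 1).map (fun j => if A - 1 ≤ i + j then A - j else 0)

-- phase-2 inner step acting on a row only (columnIndex lives in the pair)
def pvRstep (st : List Int × Int) (j : Int) : List Int × Int :=
  (PySem.List.pySetD st.1 st.2 j, st.2 - 1)

theorem pvRstep_length (L : List Int) : ∀ (st : List Int × Int),
    ((L.foldl pvRstep st).1).length = st.1.length := by
  induction L with
  | nil => intro st; rfl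
  | cons x t ih =>
    intro st
    simp [List.foldl_cons, ih, pvRstep, PySem.List.length_pySetD]

-- the row loop writes j, j+1, … into positions c, c-1, …
theorem pvRloop_get (m : Nat) : ∀ (row : List Int) (c j : Int),
    (c : Int) < row.length → (m : Int) ≤ c + 1 →
    ∀ (p : Nat) (hp : p < row.length),
      (((PySem.List.pyRange j (j + m) 1).foldl pvRstep (row, c)).1)[p]'(by
        rw [pvRstep_length]; exact hp) =
      if c - m < (p : Int) ∧ (p : Int) ≤ c then j + (c - p) else row[p] := by
  induction m with
  | zero =>
    intro row c j hc hm p hp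
    rw [PySem.List.pyRange_one_eq_nil (by omega)]
    simp only [List.foldl_nil]
    rw [if_neg (by omega)]
  | succ m ih =>
    intro row c j hc hm p hp
    have hcons : PySem.List.pyRange j (j + (m + 1 : Nat)) 1 = j :: PySem.List.pyRange (j + 1) (j + 1 + (m : Nat)) 1 := by
      rw [PySem.List.pyRange_one_cons (by push_cast; omega)]
      congr 1; push_cast; ring_nf
    rw [hcons]
    simp only [List.foldl_cons]
    have hc0 : (0 : Int) ≤ c := by push_cast at hm ⊢; omega
    have hset : pvRstep (row, c) j = (row.set c.toNat j, c - 1) := by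
      simp [pvRstep, PySem.List.pySetD_of_nonneg row j hc0]
    simp only [hset]
    have hlen : (row.set c.toNat j).length = row.length := by simp
    rw [ih (row.set c.toNat j) (c - 1) (j + 1) (by rw [hlen]; omega) (by push_cast at hm ⊢; omega) p (by rw [hlen]; exact hp)]
    have hgs : (row.set c.toNat j)[p]'(by rw [hlen]; exact hp) = if c.toNat = p then j else row[p] :=
      List.getElem_set (by rw [hlen]; exact hp)
    by_cases h1 : c - 1 - m < (p : Int) ∧ (p : Int) ≤ c - 1
    · rw [if_pos h1, if_pos (by push_cast at h1 ⊢; omega)]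
      ring
    · rw [if_neg h1, hgs]
      by_cases h2 : c.toNat = p
      · rw [if_pos h2, if_pos (by push_cast; omega)]
        omega
      · rw [if_neg h2, if_neg (by push_cast at h1 ⊢; omega)]

theorem pvZrow_length (A : Int) : (pvZrow A).length = A.toNat := by
  simp [pvZrow, PySem.List.length_pyRange_one]

theorem pvFrow_length (A i : Int) : (pvFrow A i).length = A.toNat := by
  simp [pvFrow, PySem.List.length_pyRange_one]

theorem pvZrow_get (A : Int) (p : Nat) (hp : p < (pvZrow A).length) : (pvZrow A)[p] = 0 := by
  simp [pvZrow]

theorem pvFrow_get (A i : Int) (p : Nat) (hp : p < (pvFrow A i).length) :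
    (pvFrow A i)[p] = if A - 1 ≤ i + p then A - p else 0 := by
  simp only [pvFrow, List.getElem_map, PySem.List.getElem_pyRange_one, zero_add]

-- the inner loop turns the zero row into B's closed-form row
theorem pvRow_final (A i : Int) (hi : 0 ≤ i) (hiA : i < A) :
    ((PySem.List.pyRange 1 (i + 2) 1).foldl pvRstep (pvZrow A, A - 1)).1 = pvFrow A i := by
  have hm : i + 2 = 1 + ((i + 1).toNat : Int) := by omega
  have hlen0 : ((A - 1 : Int)) < ((pvZrow A).length : Int) := by
    rw [pvZrow_length]; omega
  rw [hm]
  apply List.ext_getElem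
  · rw [pvRstep_length, pvZrow_length, pvFrow_length]
  · intro p hp1 hp2
    have hp : p < (pvZrow A).length := by rw [pvRstep_length] at hp1; exact hp1
    rw [pvRloop_get ((i + 1).toNat) (pvZrow A) (A - 1) 1 hlen0 (by omega) p hp]
    rw [pvFrow_get A i p hp2]
    have hplt : (p : Int) < A := by
      have := hp; rw [pvZrow_length] at this; omega
    by_cases h : A - 1 ≤ i + (p : Int)
    · rw [if_pos (by omega), if_pos h]; omega
    · rw [if_neg (by omega), if_neg h, pvZrow_get A p hp]

-- phase-2 outer step (exactly the port's lambda)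
def pvGstep (A : Int) (result : List (List Int)) (i : Int) : List (List Int) :=
  ((PySem.List.pyRange 1 (i + 2) 1).foldl
    (fun (st : List (List Int) × Int) j =>
      (PySem.List.pySetD st.1 i (PySem.List.pySetD (PySem.List.pyGetD st.1 i []) st.2 j), st.2 - 1))
    (result, A - 1)).1

-- the pair loop only rewrites row i: it is pySetD of the row loop's result
theorem pvPair_loop (i : Int) (hi : 0 ≤ i) (L : List Int) :
    ∀ (res : List (List Int)) (row : List Int) (c : Int), i < (res.length : Int) →
    ((L.foldl (fun (st : List (List Int) × Int) j =>
        (PySem.List.pySetD st.1 i (PySem.List.pySetD (PySem.List.pyGetD st.1 i []) st.2 j), st.2 - 1))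
      (res.set i.toNat row, c)).1)
    = res.set i.toNat ((L.foldl pvRstep (row, c)).1) := by
  induction L with
  | nil => intro res row c hlt; rfl
  | cons x t ih =>
    intro res row c hlt
    simp only [List.foldl_cons]
    have hget : PySem.List.pyGetD (res.set i.toNat row) i [] = row := by
      rw [PySem.List.pyGetD_eq_getElem _ _ hi (by simpa using hlt)]
      exact List.getElem_set_self (by simp; omega)
    have hsets : PySem.List.pySetD (res.set i.toNat row) i
        (PySem.List.pySetD row c x) = res.set i.toNat (PySem.List.pySetD row c x) := by
      rw [PySem.List.pySetD_of_nonneg _ _ hi, List.set_set]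
    rw [hget, hsets, ih res _ (c - 1) hlt]
    rfl

theorem pvGstep_eq (A : Int) (res : List (List Int)) (i : Int) (hi : 0 ≤ i)
    (hlt : i < (res.length : Int)) :
    pvGstep A res i = res.set i.toNat
      ((( PySem.List.pyRange 1 (i + 2) 1).foldl pvRstep (PySem.List.pyGetD res i [], A - 1)).1) := by
  have hself : res = res.set i.toNat (PySem.List.pyGetD res i []) := by
    rw [PySem.List.pyGetD_eq_getElem _ _ hi (by simpa using hlt)]
    exact (List.set_getElem_self (by omega)).symm
  unfold pvGstep
  conv_lhs => rw [hself]
  rw [pvPair_loop i hi _ res _ (A - 1) hlt]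

-- outer loop invariant: rows below a are final, the rest still zero
theorem pvOuter (A : Int) (m : Nat) : ∀ (a : Int), 0 ≤ a → a + m = A →
    (PySem.List.pyRange a A 1).foldl (pvGstep A)
      ((PySem.List.pyRange 0 A 1).map (fun t => if t < a then pvFrow A t else pvZrow A))
    = (PySem.List.pyRange 0 A 1).map (fun t => pvFrow A t) := by
  induction m with
  | zero =>
    intro a ha hA
    rw [show PySem.List.pyRange a A 1 = [] from PySem.List.pyRange_one_eq_nil (by push_cast at hA; omega)]
    simp only [List.foldl_nil]
    apply List.map_congr_left
    intro t ht
    rw [PySem.List.mem_pyRange_one] at ht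
    rw [if_pos (by omega)]
  | succ m ih =>
    intro a ha hA
    have haA : a < A := by push_cast at hA; omega
    rw [PySem.List.pyRange_one_cons haA]
    simp only [List.foldl_cons]
    have hlen : (((PySem.List.pyRange 0 A 1).map (fun t => if t < a then pvFrow A t else pvZrow A)).length : Int) = A := by
      simp [PySem.List.length_pyRange_one]; omega
    have hgeta : PySem.List.pyGetD ((PySem.List.pyRange 0 A 1).map (fun t => if t < a then pvFrow A t else pvZrow A)) a [] = pvZrow A := by
      rw [PySem.List.pyGetD_map_pyRange_of_nonneg _ _ _ _ ha haA]
      rw [if_neg (by omega)]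
    rw [pvGstep_eq A _ a ha (by omega), hgeta, pvRow_final A a ha haA]
    have hstep : ((PySem.List.pyRange 0 A 1).map (fun t => if t < a then pvFrow A t else pvZrow A)).set a.toNat (pvFrow A a)
        = (PySem.List.pyRange 0 A 1).map (fun t => if t < a + 1 then pvFrow A t else pvZrow A) := by
      apply List.ext_getElem
      · simp
      · intro p hp1 hp2
        have hpA : (p : Int) < A := by
          simp [PySem.List.length_pyRange_one] at hp2; omega
        rw [List.getElem_set]
        simp only [List.getElem_map, PySem.List.getElem_pyRange_one, zero_add]
        by_cases h2 : a.toNat = p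
        · rw [if_pos h2, if_pos (by omega)]
          congr 1; omega
        · rw [if_neg h2]
          by_cases h3 : (p : Int) < a
          · rw [if_pos h3, if_pos (by omega)]
          · rw [if_neg h3, if_neg (by omega)]
    rw [hstep]
    exact ih (a + 1) (by omega) (by push_cast at hA ⊢; omega)

theorem printPattern2_eq_alt (A : Int) : printPattern2 A = printPattern2_alt A := by
  unfold printPattern2 printPattern2_alt
  have hrow : (PySem.List.pyRange 0 A 1).foldl (fun (row : List Int) _j => row ++ [(0 : Int)]) [] = pvZrow A := by
    rw [show (fun (row : List Int) (_j : Int) => row ++ [(0 : Int)]) = (fun (acc : List Int) (x : Int) => acc ++ [(fun _ => (0:Int)) x]) from rfl]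
    rw [PySem.List.foldl_append_singleton_eq_map]
    rfl
  have hphase1 : (PySem.List.pyRange 0 A 1).foldl
      (fun (result : List (List Int)) _i =>
        result ++ [(PySem.List.pyRange 0 A 1).foldl (fun (row : List Int) _j => row ++ [(0 : Int)]) []]) []
      = (PySem.List.pyRange 0 A 1).map (fun t => if t < 0 then pvFrow A t else pvZrow A) := by
    rw [hrow]
    rw [show (fun (result : List (List Int)) (_i : Int) => result ++ [pvZrow A]) = (fun (acc : List (List Int)) (x : Int) => acc ++ [(fun _ => pvZrow A) x]) from rfl]
    rw [PySem.List.foldl_append_singleton_eq_map]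
    simp only [List.nil_append]
    apply List.map_congr_left
    intro t ht
    rw [PySem.List.mem_pyRange_one] at ht
    rw [if_neg (by omega)]
  by_cases hA : 0 ≤ A
  · simp only [hrow]
    calc (PySem.List.pyRange 0 A 1).foldl (fun result i =>
          ((PySem.List.pyRange 1 (i + 2) 1).foldl
            (fun (st : List (List Int) × Int) j =>
              (PySem.List.pySetD st.1 i (PySem.List.pySetD (PySem.List.pyGetD st.1 i []) st.2 j), st.2 - 1))
            (result, A - 1)).1)
          ((PySem.List.pyRange 0 A 1).foldl (fun result _i => result ++ [pvZrow A]) [])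
        = (PySem.List.pyRange 0 A 1).foldl (pvGstep A)
            ((PySem.List.pyRange 0 A 1).map (fun t => if t < 0 then pvFrow A t else pvZrow A)) := by
          rw [← hphase1, hrow]
          rfl
      _ = (PySem.List.pyRange 0 A 1).map (fun t => pvFrow A t) :=
          pvOuter A A.toNat 0 le_rfl (by omega)
      _ = (PySem.List.pyRange 0 A 1).map (fun i =>
            (PySem.List.pyRange 0 A 1).map (fun j => if A - 1 ≤ i + j then A - j else 0)) := rfl
  · rw [PySem.List.pyRange_one_eq_nil (by omega)]
    rfl

-- ===== VERDICT (by name: the statement is the Claim_ definition above) =====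
theorem printPattern2_spec : Claim_equal_printPattern2 := by
  intro A _h
  unfold Spec_printPattern2
  exact printPattern2_eq_alt A
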